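-- pv_equiv track=rewrite | github.com/yangwu91/r2g | src/r2g/online/blast.py | _clear_up_list
-- ===== SOURCE A (Python) =====
-- from copy import deepcopy
--
-- def _clear_up_list(download_list):
--     stacked_list = {}
--     for sra in download_list:
--         stacked_spots = []
--         # remove redundant spots first:
--         spots = sorted({}.fromkeys(download_list[sra]).keys())
--         # stack spots:
--         start_spot, pre_spot = spots[0], (spots[0]-1)
--         for spot in spots:
--             if spot - pre_spot == 1:
--                 pass
--             else:
--                 stacked_spots.append((start_spot, pre_spot))
--                 start_spot = spot
--             pre_spot = spot
--         stacked_spots.append((start_spot, pre_spot))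
--         stacked_list[sra] = deepcopy(stacked_spots)
--     return stacked_list
-- ===== SOURCE B (Python) =====
-- def _clear_up_list(download_list):
--     # Boundary detection: a spot starts a range iff spot-1 is absent, ends one iff
--     # spot+1 is absent; pairing the sorted starts with the sorted ends gives the ranges.
--     stacked_list = {}
--     for sra, spot_dict in download_list.items():
--         spots = set(spot_dict)
--         starts = sorted(x for x in spots if x - 1 not in spots)
--         ends = sorted(x for x in spots if x + 1 not in spots)
--         stacked_list[sra] = list(zip(starts, ends))
--     return stacked_list
-- ===== Notes on version B (the rewrite author's own statement) =====
-- stated objective: alternative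
-- what changed: B replaces A's stateful start/pre linear scan (and its explicit dict-building loop) with set-membership boundary detection: a spot starts a range iff spot-1 is absent from the spot set and ends one iff spot+1 is absent, and zipping the sorted starts with the sorted ends yields the ranges.
-- crash fix: On inputs where some sra has an empty inner spot dict, A raises IndexError at spots[0]; B naturally returns an empty range list for that sra. — e.g. on _clear_up_list([("SRR1", [])]): A raises IndexError, B returns [("SRR1", [])]
import Mathlib
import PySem

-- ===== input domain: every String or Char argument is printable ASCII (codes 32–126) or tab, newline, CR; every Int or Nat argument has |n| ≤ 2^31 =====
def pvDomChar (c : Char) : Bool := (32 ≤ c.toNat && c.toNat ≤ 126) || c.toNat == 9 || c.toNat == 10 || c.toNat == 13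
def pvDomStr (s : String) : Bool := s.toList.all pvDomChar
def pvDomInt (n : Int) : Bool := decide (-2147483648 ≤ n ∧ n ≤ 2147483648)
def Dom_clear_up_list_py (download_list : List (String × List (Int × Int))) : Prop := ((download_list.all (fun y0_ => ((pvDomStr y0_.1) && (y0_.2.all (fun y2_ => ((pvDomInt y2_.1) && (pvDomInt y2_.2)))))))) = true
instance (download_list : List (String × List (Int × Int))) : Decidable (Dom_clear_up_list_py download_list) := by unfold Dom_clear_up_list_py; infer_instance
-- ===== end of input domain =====

-- B replaces A's stateful start/pre scan with set-membership boundary detection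
-- (a spot starts a range iff spot-1 is absent, ends one iff spot+1 is absent;
-- zip the sorted starts with the sorted ends): objective 'alternative'.

-- ===== PORT A =====
-- the inner 'for spot in spots' loop of A, state = (stacked_spots, start_spot, pre_spot)
def pvStackLoop : List Int → List (Int × Int) → Int → Int → List (Int × Int) × Int × Int
  | [], st, start, pre => (st, start, pre)
  | spot :: rest, st, start, pre =>
    if spot - pre == 1 then pvStackLoop rest st start spot
    else pvStackLoop rest (st ++ [(start, pre)]) spot spot

-- 'start_spot, pre_spot = spots[0], spots[0]-1; for spot in spots: …; stacked_spots.append((start_spot, pre_spot))'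
-- spots[0] raises IndexError on an empty spots list; those inputs are excluded by Pre_ (headD's default is never the value claimed)
def pvStackSpots (spots : List Int) : List (Int × Int) :=
  let s0 := spots.headD 0
  let r := pvStackLoop spots [] s0 (s0 - 1)
  r.1 ++ [(r.2.1, r.2.2)]

def clear_up_list_py (download_list : List (String × List (Int × Int))) : List (String × List (Int × Int)) :=
  ((PySem.Dict.ofList download_list).items.foldl
    (fun acc p =>
      acc.insert p.1 (pvStackSpots
        (PySem.List.sorted (PySem.List.dedup ((PySem.Dict.ofList p.2).keys)) (fun x => x) false)))
    PySem.Dict.empty).items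

-- ===== PORT B =====
def clear_up_list_py_alt (download_list : List (String × List (Int × Int))) : List (String × List (Int × Int)) :=
  (PySem.Dict.ofList download_list).items.map (fun p =>
    let spots : PySem.Set Int := PySem.Set.ofList ((PySem.Dict.ofList p.2).keys)
    let starts := PySem.List.sorted (spots.filter (fun x => !(PySem.Set.contains spots (x - 1)))) (fun x => x) false
    let ends := PySem.List.sorted (spots.filter (fun x => !(PySem.Set.contains spots (x + 1)))) (fun x => x) false
    (p.1, starts.zip ends))

-- ===== PRECONDITION & SPEC =====
-- Pre_ excludes exactly the inputs on which A raises IndexError: those whose dict has an empty inner spot dict as a value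
def Pre_clear_up_list_py (download_list : List (String × List (Int × Int))) : Prop :=
  ¬ ([] ∈ (PySem.Dict.ofList download_list).values)
instance (download_list : List (String × List (Int × Int))) : Decidable (Pre_clear_up_list_py download_list) := by unfold Pre_clear_up_list_py; infer_instance
def pvWitness_clear_up_list_py : (List (String × List (Int × Int))) := [("SRR1", [(1, 0), (2, 0), (5, 0)])]

-- On inputs with an empty inner spot dict A raises IndexError at spots[0]; B naturally returns an empty range list for that sra.
def Raises_clear_up_list_py (download_list : List (String × List (Int × Int))) : Prop :=
  [] ∈ (PySem.Dict.ofList download_list).values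
instance (download_list : List (String × List (Int × Int))) : Decidable (Raises_clear_up_list_py download_list) := by unfold Raises_clear_up_list_py; infer_instance
def pvRaiseWitness_clear_up_list_py : (List (String × List (Int × Int))) := [("SRR1", [])]
def pvRaiseWitnessOut_clear_up_list_py : List (String × List (Int × Int)) := [("SRR1", [])]

def Spec_clear_up_list_py (download_list : List (String × List (Int × Int))) (out : List (String × List (Int × Int))) : Prop := out = clear_up_list_py_alt download_list
instance (download_list : List (String × List (Int × Int))) (out : List (String × List (Int × Int))) : Decidable (Spec_clear_up_list_py download_list out) := by unfold Spec_clear_up_list_py; infer_instance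

-- ===== CLAIM (what is proved, stated in full; the proofs are below) =====
def Claim_equal_clear_up_list_py : Prop := ∀ (download_list : List (String × List (Int × Int))), Dom_clear_up_list_py download_list → Pre_clear_up_list_py download_list → Spec_clear_up_list_py download_list (clear_up_list_py download_list)
def Claim_raises_clear_up_list_py : Prop := (∀ (download_list : List (String × List (Int × Int))), Dom_clear_up_list_py download_list → Raises_clear_up_list_py download_list → ¬ Pre_clear_up_list_py download_list) ∧ (Dom_clear_up_list_py (pvRaiseWitness_clear_up_list_py) ∧ Raises_clear_up_list_py (pvRaiseWitness_clear_up_list_py) ∧ clear_up_list_py_alt (pvRaiseWitness_clear_up_list_py) = pvRaiseWitnessOut_clear_up_list_py)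

-- ===== LEMMAS AND PROOFS =====

-- the ranges of a spot list, as A's inner scan produces them (after the first element)
def specRanges (start pre : Int) : List Int → List (Int × Int)
  | [] => [(start, pre)]
  | x :: xs => if x - pre = 1 then specRanges start x xs else (start, pre) :: specRanges x x xs

def firstRunEnd (pre : Int) : List Int → Int
  | [] => pre
  | x :: xs => if x - pre = 1 then firstRunEnd x xs else pre

def restRanges (pre : Int) : List Int → List (Int × Int)
  | [] => []
  | x :: xs => if x - pre = 1 then restRanges x xs else specRanges x x xs

def specList : List Int → List (Int × Int)
  | [] => []
  | x :: xs => specRanges x x xs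

theorem specRanges_eq (rest : List Int) : ∀ start pre,
    specRanges start pre rest = (start, firstRunEnd pre rest) :: restRanges pre rest := by
  induction rest with
  | nil => intro s p; rfl
  | cons x xs ih =>
    intro s p
    simp only [specRanges, firstRunEnd, restRanges]
    by_cases h : x - p = 1 <;> simp [h, ih]

theorem stackLoop_eq (rest : List Int) : ∀ st start pre,
    (pvStackLoop rest st start pre).1 ++ [((pvStackLoop rest st start pre).2.1, (pvStackLoop rest st start pre).2.2)]
      = st ++ specRanges start pre rest := by
  induction rest with
  | nil => intro st s p; rfl
  | cons x xs ih =>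
    intro st s p
    simp only [pvStackLoop, specRanges]
    have hb : ((x - p == 1) = true) ↔ x - p = 1 := by simp
    by_cases h : x - p = 1
    · rw [if_pos (hb.mpr h), if_pos h, ih]
    · rw [if_neg (fun hc => h (hb.mp hc)), if_neg h, ih]
      simp [List.append_assoc]

theorem stackSpots_eq (s0 : Int) (rest : List Int) :
    pvStackSpots (s0 :: rest) = specList (s0 :: rest) := by
  unfold pvStackSpots specList
  simp only [List.headD_cons, pvStackLoop]
  have h1 : (s0 - (s0 - 1) == 1) = true := by simp
  rw [h1]
  simpa using stackLoop_eq rest [] s0 s0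

-- boundary detection on a strictly increasing list yields exactly A's ranges
theorem zip_boundaries_eq (l : List Int) (h : l.Pairwise (· < ·)) :
    (l.filter (fun x => !decide ((x - 1) ∈ l))).zip (l.filter (fun x => !decide ((x + 1) ∈ l))) = specList l := by
  induction l with
  | nil => rfl
  | cons x xs ih =>
    have hx : ∀ z ∈ xs, x < z := fun z hz => (List.pairwise_cons.mp h).1 z hz
    have hxs : xs.Pairwise (· < ·) := (List.pairwise_cons.mp h).2
    have hxm1 : (x - 1) ∉ (x :: xs) := by
      intro hm
      rcases List.mem_cons.mp hm with h1 | h1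
      · omega
      · have := hx _ h1; omega
    cases xs with
    | nil => simp [specList, specRanges]
    | cons y ys =>
      have hy : x < y := hx y (by simp)
      have hys : ∀ z ∈ ys, y < z := fun z hz => (List.pairwise_cons.mp hxs).1 z hz
      -- membership of z∓1 in the full list vs. in the tail, for z in the tail
      have hS : ∀ z ∈ y :: ys, y < z → (decide ((z - 1) ∈ (x :: y :: ys))) = (decide ((z - 1) ∈ (y :: ys))) := by
        intro z hz hyz
        apply decide_eq_decide.mpr
        simp only [List.mem_cons]
        constructor
        · rintro (h1 | h1)
          · exfalso; omega
          · exact h1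
        · intro h1; right; exact h1
      have hE : ∀ z ∈ y :: ys, (decide ((z + 1) ∈ (x :: y :: ys))) = (decide ((z + 1) ∈ (y :: ys))) := by
        intro z hz
        have hzy : y ≤ z := by
          rcases List.mem_cons.mp hz with h1 | h1
          · omega
          · have := hys _ h1; omega
        apply decide_eq_decide.mpr
        simp only [List.mem_cons]
        constructor
        · rintro (h1 | h1)
          · exfalso; omega
          · exact h1
        · intro h1; right; exact h1
      have hEfull : List.filter (fun z => !decide ((z + 1) ∈ (x :: y :: ys))) (y :: ys)
          = List.filter (fun z => !decide ((z + 1) ∈ (y :: ys))) (y :: ys) :=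
        List.filter_congr (fun z hz => by rw [hE z hz])
      have ihT := ih hxs
      by_cases hcons : y = x + 1
      · -- the run through x continues into y
        have hSys : List.filter (fun z => !decide ((z - 1) ∈ (x :: y :: ys))) ys
            = List.filter (fun z => !decide ((z - 1) ∈ (y :: ys))) ys :=
          List.filter_congr (fun z hz => by rw [hS z (by simp [hz]) (hys z hz)])
        have hstartsL : List.filter (fun z => !decide ((z - 1) ∈ (x :: y :: ys))) (x :: y :: ys)
            = x :: List.filter (fun z => !decide ((z - 1) ∈ (y :: ys))) ys := by
          rw [List.filter_cons_of_pos (by simp [hxm1]),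
              List.filter_cons_of_neg (by simp; omega), hSys]
        have hstartsT : List.filter (fun z => !decide ((z - 1) ∈ (y :: ys))) (y :: ys)
            = y :: List.filter (fun z => !decide ((z - 1) ∈ (y :: ys))) ys := by
          rw [List.filter_cons_of_pos]
          simp only [Bool.not_eq_eq_eq_not, Bool.not_true, decide_eq_false_iff_not]
          intro hmem
          rcases List.mem_cons.mp hmem with h1 | h1
          · omega
          · have := hys _ h1; omega
        have hendsL : List.filter (fun z => !decide ((z + 1) ∈ (x :: y :: ys))) (x :: y :: ys)
            = List.filter (fun z => !decide ((z + 1) ∈ (y :: ys))) (y :: ys) := by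
          rw [List.filter_cons_of_neg (by simp; omega), hEfull]
        rw [hstartsL, hendsL]
        rw [hstartsT] at ihT
        -- specList (y :: ys) = (y, e) :: t
        have hspecT : specList (y :: ys) = (y, firstRunEnd y ys) :: restRanges y ys := by
          simp [specList, specRanges_eq]
        rw [hspecT] at ihT
        rcases hends : List.filter (fun z => !decide ((z + 1) ∈ (y :: ys))) (y :: ys) with _ | ⟨e0, E⟩
        · rw [hends] at ihT; simp at ihT
        · rw [hends] at ihT
          simp only [List.zip_cons_cons, List.cons.injEq, Prod.mk.injEq] at ihT
          obtain ⟨⟨-, he0⟩, ht⟩ := ihT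
          rw [List.zip_cons_cons, ht, he0]
          simp only [specList, specRanges, if_pos (by omega : y - x = 1)]
          rw [specRanges_eq]
      · -- x is a singleton-range start: x ends its own run
        have hSfull : List.filter (fun z => !decide ((z - 1) ∈ (x :: y :: ys))) (y :: ys)
            = List.filter (fun z => !decide ((z - 1) ∈ (y :: ys))) (y :: ys) := by
          apply List.filter_congr
          intro z hz
          rcases List.mem_cons.mp hz with h1 | h1
          · subst h1
            congr 1
            apply decide_eq_decide.mpr
            simp only [List.mem_cons]
            constructor
            · rintro (h1 | h1)
              · exfalso; omega
              · exact h1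
            · intro h1; right; exact h1
          · rw [hS z (by simp [h1]) (hys z h1)]
        have hstartsL : List.filter (fun z => !decide ((z - 1) ∈ (x :: y :: ys))) (x :: y :: ys)
            = x :: List.filter (fun z => !decide ((z - 1) ∈ (y :: ys))) (y :: ys) := by
          rw [List.filter_cons_of_pos (by simp [hxm1]), hSfull]
        have hendsL : List.filter (fun z => !decide ((z + 1) ∈ (x :: y :: ys))) (x :: y :: ys)
            = x :: List.filter (fun z => !decide ((z + 1) ∈ (y :: ys))) (y :: ys) := by
          rw [List.filter_cons_of_pos, hEfull]
          simp only [Bool.not_eq_eq_eq_not, Bool.not_true, decide_eq_false_iff_not]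
          intro hmem
          rcases List.mem_cons.mp hmem with h1 | h1
          · omega
          · rcases List.mem_cons.mp h1 with h2 | h2
            · omega
            · have := hys _ h2; omega
        rw [hstartsL, hendsL, List.zip_cons_cons, ihT]
        simp only [specList, specRanges, if_neg (by omega : ¬ (y - x = 1))]

-- (Dict.ofList v).keys is set(keys of v) in order
theorem keys_ofList_eq (v : List (Int × Int)) :
    (PySem.Dict.ofList v).keys = PySem.Set.ofList (v.map Prod.fst) := by
  have h : PySem.Dict.ofList v
      = v.foldl (fun (d : PySem.Dict Int Int) p => d.insert p.1 p.2) PySem.Dict.empty := rfl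
  rw [h, PySem.Dict.keys_foldl_insert_key v Prod.fst (fun _ p => p.2) PySem.Dict.empty]
  simp [PySem.Set.update_nil_left]

-- per-sra equality: A's scan of sorted(dedup(keys)) = B's zipped boundaries
theorem item_eq (v : List (Int × Int)) (hv : v ≠ []) :
    pvStackSpots (PySem.List.sorted (PySem.List.dedup ((PySem.Dict.ofList v).keys)) (fun x => x) false)
    = (PySem.List.sorted (((PySem.Set.ofList ((PySem.Dict.ofList v).keys) : PySem.Set Int)).filter
          (fun x => !(PySem.Set.contains (PySem.Set.ofList ((PySem.Dict.ofList v).keys)) (x - 1)))) (fun x => x) false).zip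
      (PySem.List.sorted (((PySem.Set.ofList ((PySem.Dict.ofList v).keys) : PySem.Set Int)).filter
          (fun x => !(PySem.Set.contains (PySem.Set.ofList ((PySem.Dict.ofList v).keys)) (x + 1)))) (fun x => x) false) := by
  have hnd : ((PySem.Dict.ofList v).keys).Nodup := PySem.Dict.nodup_keys_ofList v
  have hself : PySem.Set.ofList ((PySem.Dict.ofList v).keys) = (PySem.Dict.ofList v).keys :=
    PySem.Set.ofList_eq_self_of_nodup _ hnd
  have hded : PySem.List.dedup ((PySem.Dict.ofList v).keys) = (PySem.Dict.ofList v).keys := by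
    rw [PySem.List.dedup_eq_ofList]; exact hself
  have hkne : (PySem.Dict.ofList v).keys ≠ [] := by
    rw [keys_ofList_eq]
    cases v with
    | nil => exact absurd rfl hv
    | cons q t => simp [PySem.Set.ofList_cons]
  set ks := (PySem.Dict.ofList v).keys with hks
  set spots := PySem.List.sorted ks (fun x => x) false with hspots
  have hpw : spots.Pairwise (· < ·) := by
    have := PySem.List.sorted_ofList_pairwise_lt ks
    rwa [hself] at this
  have hperm : spots.Perm ks := PySem.List.sorted_perm ks _ _
  have hsne : spots ≠ [] := by
    rw [hspots, Ne, PySem.List.sorted_eq_nil_iff]; exact hkne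
  have hcont : ∀ (s : List Int) (a : Int), PySem.Set.contains s a = decide (a ∈ s) := by
    intro s a; simp [PySem.Set.contains]
  have hbridge : ∀ (c : Int),
      PySem.List.sorted (ks.filter (fun x => !(PySem.Set.contains ks (x + c)))) (fun x => x) false
        = spots.filter (fun x => !decide ((x + c) ∈ spots)) := by
    intro c
    apply PySem.List.sorted_eq_of_perm_of_pairwise_lt
    · have heq : spots.filter (fun x => !decide ((x + c) ∈ spots))
          = spots.filter (fun x => !(PySem.Set.contains ks (x + c))) := by
        apply List.filter_congr
        intro z _
        rw [hcont ks (z + c)]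
        congr 1
        exact decide_eq_decide.mpr (hperm.mem_iff)
      rw [heq]
      exact hperm.filter _
    · exact hpw.filter _
  have hb1 := hbridge (-1)
  have hb2 := hbridge 1
  simp only [show ∀ x : Int, x + (-1) = x - 1 from fun x => by ring] at hb1
  rw [hself, hded, ← hspots, hb1, hb2, zip_boundaries_eq spots hpw]
  cases hsp : spots with
  | nil => exact absurd hsp hsne
  | cons s0 rest => exact stackSpots_eq s0 rest

-- the outer dict-building loop of A appends one item per sra, in order
theorem clear_up_list_py_eq_map (download_list : List (String × List (Int × Int))) :
    clear_up_list_py download_list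
      = (PySem.Dict.ofList download_list).items.map (fun p =>
          (p.1, pvStackSpots (PySem.List.sorted (PySem.List.dedup ((PySem.Dict.ofList p.2).keys)) (fun x => x) false))) := by
  unfold clear_up_list_py
  rw [PySem.Dict.items_foldl_insert_fresh
        (PySem.Dict.ofList download_list).items Prod.fst
        (fun p => pvStackSpots (PySem.List.sorted (PySem.List.dedup ((PySem.Dict.ofList p.2).keys)) (fun x => x) false))
        PySem.Dict.empty
        (fun a _ => by simp [pysem])
        (by have := PySem.Dict.nodup_keys_ofList download_list
            simpa [PySem.Dict.keys] using this)]
  simp [show (PySem.Dict.empty : PySem.Dict String (List (Int × Int))).items = [] from rfl]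

-- ===== VERDICT (by name: the statement is the Claim_ definition above) =====
theorem clear_up_list_py_spec : Claim_equal_clear_up_list_py := by
  intro download_list _ hpre
  unfold Spec_clear_up_list_py
  rw [clear_up_list_py_eq_map]
  unfold clear_up_list_py_alt
  apply List.map_congr_left
  intro p hp
  have hv : p.2 ≠ [] := by
    intro hnil
    apply hpre
    simp only [PySem.Dict.values]
    exact List.mem_map.mpr ⟨p, hp, by simp [hnil]⟩
  exact congrArg (fun r => (p.1, r)) (item_eq p.2 hv)

@[simp] theorem clear_up_list_py_raises : Claim_raises_clear_up_list_py := by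
  unfold Claim_raises_clear_up_list_py
  exact ⟨fun dl _ hr hp => hp hr, by decide⟩
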